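-- pv_equiv track=rewrite | github.com/jernejjanez/advent-of-code | 2023/day-11/day11.py | calculate_shortest_path
-- ===== SOURCE A (Python) =====
-- def calculate_shortest_path(y, x, y1, x1, rows_to_expand, columns_to_expand, multiplier):
--     empty_rows = 0
--     for row in rows_to_expand:
--         if y < y1:
--             if y < row < y1:
--                 empty_rows += 1
--         elif y1 < y:
--             if y1 < row < y:
--                 empty_rows += 1
--
--     empty_columns = 0
--     for column in columns_to_expand:
--         if x < x1:
--             if x < column < x1:
--                 empty_columns += 1
--         elif x1 < x:
--             if x1 < column < x:
--                 empty_columns += 1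
--     return abs(y1 - y) + (empty_rows * (multiplier - 1)) + abs(x1 - x) + (empty_columns * (multiplier - 1))
-- ===== SOURCE B (Python) =====
-- def _bisect_left(s, v):
--     # first index at which v could be inserted keeping s sorted
--     lo, hi = 0, len(s)
--     while lo < hi:
--         mid = (lo + hi) // 2
--         if s[mid] < v:
--             lo = mid + 1
--         else:
--             hi = mid
--     return lo
--
--
-- def _bisect_right(s, v):
--     # last index at which v could be inserted keeping s sorted
--     lo, hi = 0, len(s)
--     while lo < hi:
--         mid = (lo + hi) // 2
--         if s[mid] <= v:
--             lo = mid + 1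
--         else:
--             hi = mid
--     return lo
--
--
-- def _count_strictly_between(values, a, b):
--     if a == b:
--         return 0
--     lo, hi = (a, b) if a < b else (b, a)
--     s = sorted(values)
--     return _bisect_left(s, hi) - _bisect_right(s, lo)
--
--
-- def calculate_shortest_path(y, x, y1, x1, rows_to_expand, columns_to_expand, multiplier):
--     extra = multiplier - 1
--     return (abs(y1 - y) + abs(x1 - x)
--             + extra * (_count_strictly_between(rows_to_expand, y, y1)
--                        + _count_strictly_between(columns_to_expand, x, x1)))
-- ===== Notes on version B (the rewrite author's own statement) =====
-- stated objective: alternative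
-- what changed: B replaces A's two per-element scan loops with sort + two binary searches (bisect_left/bisect_right on the sorted expansion lists) and folds the duplicated (multiplier-1) arithmetic into one term.
import Mathlib
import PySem

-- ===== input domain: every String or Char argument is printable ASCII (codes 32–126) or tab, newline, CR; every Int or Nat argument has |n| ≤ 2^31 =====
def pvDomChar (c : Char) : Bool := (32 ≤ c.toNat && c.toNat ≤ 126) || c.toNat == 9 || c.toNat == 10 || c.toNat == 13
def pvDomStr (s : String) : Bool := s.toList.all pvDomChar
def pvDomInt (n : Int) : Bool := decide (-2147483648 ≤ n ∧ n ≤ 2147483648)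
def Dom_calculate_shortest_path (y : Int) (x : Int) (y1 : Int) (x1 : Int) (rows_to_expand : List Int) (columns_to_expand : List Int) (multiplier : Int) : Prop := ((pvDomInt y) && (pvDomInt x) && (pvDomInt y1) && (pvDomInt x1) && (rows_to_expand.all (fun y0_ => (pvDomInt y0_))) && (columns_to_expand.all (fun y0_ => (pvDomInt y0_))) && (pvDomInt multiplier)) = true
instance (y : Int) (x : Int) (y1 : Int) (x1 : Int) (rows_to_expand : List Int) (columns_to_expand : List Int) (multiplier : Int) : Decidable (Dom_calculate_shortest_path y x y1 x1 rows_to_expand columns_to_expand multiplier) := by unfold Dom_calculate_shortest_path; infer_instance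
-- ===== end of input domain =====

-- B replaces A's two per-element scan loops with sort + two binary searches (bisect on the
-- sorted expansion lists) and folds the duplicated (multiplier-1) arithmetic into one term;
-- objective: alternative algorithm (same exact results).

-- ===== PORT A =====
def calculate_shortest_path (y : Int) (x : Int) (y1 : Int) (x1 : Int) (rows_to_expand : List Int) (columns_to_expand : List Int) (multiplier : Int) : Int :=
  let empty_rows : Int := rows_to_expand.foldl (fun acc row =>
    if y < y1 then (if y < row ∧ row < y1 then acc + 1 else acc)
    else if y1 < y then (if y1 < row ∧ row < y then acc + 1 else acc)
    else acc) 0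
  let empty_columns : Int := columns_to_expand.foldl (fun acc column =>
    if x < x1 then (if x < column ∧ column < x1 then acc + 1 else acc)
    else if x1 < x then (if x1 < column ∧ column < x then acc + 1 else acc)
    else acc) 0
  |y1 - y| + (empty_rows * (multiplier - 1)) + |x1 - x| + (empty_columns * (multiplier - 1))

-- ===== PORT B =====
-- _bisect_left/_bisect_right in Source B are the standard binary searches; ported as the
-- prelude's bisect primitives PySem.List.bisectLeft / bisectRight (same algorithm).
def countStrictlyBetween (values : List Int) (a b : Int) : Int :=
  if a = b then 0
  else
    let lo : Int := if a < b then a else b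
    let hi : Int := if a < b then b else a
    let s := PySem.List.sorted values (fun v => v) false
    (PySem.List.bisectLeft s hi : Int) - (PySem.List.bisectRight s lo : Int)

def calculate_shortest_path_alt (y : Int) (x : Int) (y1 : Int) (x1 : Int) (rows_to_expand : List Int) (columns_to_expand : List Int) (multiplier : Int) : Int :=
  let extra := multiplier - 1
  |y1 - y| + |x1 - x| +
    extra * (countStrictlyBetween rows_to_expand y y1 + countStrictlyBetween columns_to_expand x x1)

-- ===== PRECONDITION & SPEC =====
def Spec_calculate_shortest_path (y : Int) (x : Int) (y1 : Int) (x1 : Int) (rows_to_expand : List Int) (columns_to_expand : List Int) (multiplier : Int) (out : Int) : Prop := out = calculate_shortest_path_alt y x y1 x1 rows_to_expand columns_to_expand multiplier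
instance (y : Int) (x : Int) (y1 : Int) (x1 : Int) (rows_to_expand : List Int) (columns_to_expand : List Int) (multiplier : Int) (out : Int) : Decidable (Spec_calculate_shortest_path y x y1 x1 rows_to_expand columns_to_expand multiplier out) := by unfold Spec_calculate_shortest_path; infer_instance

-- ===== CLAIM (what is proved, stated in full; the proofs are below) =====
def Claim_equal_calculate_shortest_path : Prop := ∀ (y : Int) (x : Int) (y1 : Int) (x1 : Int) (rows_to_expand : List Int) (columns_to_expand : List Int) (multiplier : Int), Dom_calculate_shortest_path y x y1 x1 rows_to_expand columns_to_expand multiplier → Spec_calculate_shortest_path y x y1 x1 rows_to_expand columns_to_expand multiplier (calculate_shortest_path y x y1 x1 rows_to_expand columns_to_expand multiplier)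

-- ===== LEMMAS AND PROOFS =====

-- A's per-element loop counts the elements strictly between min a b and max a b.
lemma aFold_eq_countP (a b : Int) (l : List Int) :
    l.foldl (fun acc r =>
      if a < b then (if a < r ∧ r < b then acc + 1 else acc)
      else if b < a then (if b < r ∧ r < a then acc + 1 else acc)
      else acc) (0 : Int)
    = (l.countP (fun r => decide (min a b < r ∧ r < max a b)) : Int) := by
  have hf : (fun (acc : Int) (r : Int) =>
      if a < b then (if a < r ∧ r < b then acc + 1 else acc)
      else if b < a then (if b < r ∧ r < a then acc + 1 else acc)
      else acc)
      = fun acc r => if (fun r => decide (min a b < r ∧ r < max a b)) r = true then acc + 1 else acc := by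
    funext acc r
    simp only [decide_eq_true_eq]
    rcases lt_trichotomy a b with h | h | h <;> split_ifs <;> first | rfl | omega
  rw [hf, PySem.List.foldl_if_add_one]
  simp

-- countP of a predicate that holds exactly on the first n positions of a list is n.
lemma countP_of_index_iff (s : List Int) (p : Int → Bool) (n : Nat) (hn : n ≤ s.length)
    (h : ∀ (j : Nat) (hj : j < s.length), p s[j] = true ↔ j < n) : s.countP p = n := by
  conv_lhs => rw [← List.take_append_drop n s]
  rw [List.countP_append]
  have h1 : (s.take n).countP p = n := by
    rw [List.countP_eq_length.mpr, List.length_take]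
    · omega
    · intro a ha
      obtain ⟨j, hj, rfl⟩ := List.mem_iff_getElem.mp ha
      have hjs : j < s.length := by simp at hj; omega
      rw [List.getElem_take]
      exact (h j hjs).mpr (by simp at hj; omega)
  have h2 : (s.drop n).countP p = 0 := by
    apply List.countP_eq_zero.mpr
    intro a ha
    obtain ⟨j, hj, rfl⟩ := List.mem_iff_getElem.mp ha
    have hjs : n + j < s.length := by simp at hj; omega
    rw [List.getElem_drop]
    intro hp
    have := (h (n + j) hjs).mp hp
    omega
  omega

-- counting 'r < hi' splits into 'r ≤ lo' plus 'lo < r < hi' when lo < hi.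
lemma countP_split (l : List Int) (lo hi : Int) (h : lo < hi) :
    l.countP (fun r => decide (r < hi))
      = l.countP (fun r => decide (r ≤ lo)) + l.countP (fun r => decide (lo < r ∧ r < hi)) := by
  induction l with
  | nil => simp
  | cons a t ih =>
    simp only [List.countP_cons, ih, decide_eq_true_eq]
    split_ifs <;> omega

-- bisect difference on the sorted list = count of elements strictly between lo and hi.
lemma bisect_diff_eq_countP (s : List Int) (lo hi : Int)
    (hs : s.Pairwise (· ≤ ·)) (hlh : lo < hi) :
    (PySem.List.bisectLeft s hi : Int) - (PySem.List.bisectRight s lo : Int)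
      = (s.countP (fun r => decide (lo < r ∧ r < hi)) : Int) := by
  obtain ⟨hbl_le, hbl1, hbl2⟩ := PySem.List.bisectLeft_spec s hi hs
  obtain ⟨hbr_le, hbr1, hbr2⟩ := PySem.List.bisectRight_spec s lo hs
  have hBL : s.countP (fun r => decide (r < hi)) = PySem.List.bisectLeft s hi := by
    apply countP_of_index_iff s _ _ hbl_le
    intro j hj
    simp only [decide_eq_true_eq]
    constructor
    · intro hlt
      by_contra hge
      exact absurd hlt (not_lt.mpr (hbl2 j hj (Nat.le_of_not_lt hge)))
    · exact hbl1 j hj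
  have hBR : s.countP (fun r => decide (r ≤ lo)) = PySem.List.bisectRight s lo := by
    apply countP_of_index_iff s _ _ hbr_le
    intro j hj
    simp only [decide_eq_true_eq]
    constructor
    · intro hle
      by_contra hge
      exact absurd hle (not_le.mpr (hbr2 j hj (Nat.le_of_not_lt hge)))
    · exact hbr1 j hj
  have key := countP_split s lo hi hlh
  omega

-- B's helper computes the same strictly-between count as A's loop.
lemma countBetween_eq (values : List Int) (a b : Int) :
    countStrictlyBetween values a b
      = (values.countP (fun r => decide (min a b < r ∧ r < max a b)) : Int) := by
  unfold countStrictlyBetween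
  by_cases hab : a = b
  · rw [if_pos hab]
    rw [List.countP_eq_zero.mpr]
    · simp
    · intro r _
      simp only [decide_eq_true_eq]
      omega
  · rw [if_neg hab]
    have h1 : (if a < b then a else b) = min a b := by split_ifs <;> omega
    have h2 : (if a < b then b else a) = max a b := by split_ifs <;> omega
    simp only [h1, h2]
    have hs : (PySem.List.sorted values (fun v => v) false).Pairwise (· ≤ ·) := by
      simpa using PySem.List.sorted_pairwise values (fun v => v)
    have hperm : (PySem.List.sorted values (fun v => v) false).Perm values :=
      PySem.List.sorted_perm values _ false
    rw [bisect_diff_eq_countP _ _ _ hs (by omega), hperm.countP_eq]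

-- ===== VERDICT (by name: the statement is the Claim_ definition above) =====
theorem calculate_shortest_path_spec : Claim_equal_calculate_shortest_path := by
  intro y x y1 x1 rows cols m _
  unfold Spec_calculate_shortest_path calculate_shortest_path calculate_shortest_path_alt
  simp only [aFold_eq_countP, countBetween_eq]
  ring
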